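-- pv_equiv track=rewrite | github.com/raghuboreda/examplecode | python/careercup/ik_dynamicprogramming.py | combination_sum_ways
-- ===== SOURCE A (Python) =====
-- def combination_sum_ways(arr, target):
--     """
--     Given a array with distinct integers, output all possible selection of integers so that their sum is
--     equal to target
--     :param arr: array of distinct positive integers
--     :param target: integer
--     :return: Number of ways to make the target
--     """
--     # use DP to find number of ways to make up target sum 1, 2...target
--     # number of ways to make target from arr of length n -1
--     # T(n) = sum of ways to make 1 + sum of ways to make target (n-1) etc
--     # sort the input array
--     arr.sort()
--     # arr 2, 3, 5 target 8
--     # idx   0  1 2 3 4 5 6 7 8   target 8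
--     # dp_   1  0 1 0 1 0 1 0 1   ( 2 )
--     #       1  0 1 1 1 1 2 1 2   ( 3 )
--     #       1  0 1 1 1 2 2 2 3   ( 5 )
--     dp_ = [0] * (target + 1)
--     dp_[0] = 1
--     for c in arr:
--         for i in range(c, target + 1):
--             dp_[i] += dp_[i - c]
--     return dp_[target]
-- ===== SOURCE B (Python) =====
-- def combination_sum_ways(arr, target):
--     """
--     Memoized skip/take depth-first search over (index, remaining) states,
--     driven by an explicit stack (so large targets do not hit the recursion
--     limit): ways(i, rem) = ways(i, rem - arr[i]) + ways(i + 1, rem), with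
--     ways = 1 at rem == 0 and 0 when rem < 0 or the coins are exhausted.
--     Sorts arr in place like the original.
--     """
--     arr.sort()
--     n = len(arr)
--     memo = {}
--     stack = [(0, target)]
--     while stack:
--         i, rem = stack[-1]
--         if (i, rem) in memo:
--             stack.pop()
--         elif rem == 0:
--             memo[i, rem] = 1
--             stack.pop()
--         elif rem < 0 or i == n:
--             memo[i, rem] = 0
--             stack.pop()
--         else:
--             take = memo.get((i, rem - arr[i]))
--             skip = memo.get((i + 1, rem))
--             if take is not None and skip is not None:
--                 memo[i, rem] = take + skip
--                 stack.pop()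
--             else:
--                 if take is None:
--                     stack.append((i, rem - arr[i]))
--                 if skip is None:
--                     stack.append((i + 1, rem))
--     return memo[0, target]
-- ===== Notes on version B (the rewrite author's own statement) =====
-- stated objective: faster
-- what changed: Replaces A's bottom-up per-coin table sweeps (dp_[i] += dp_[i-c] over the whole 0..target range for every coin) with a top-down memoized skip/take search over (index, remaining) states, driven by an explicit stack and a dict memo, so only states reachable from (0, target) are ever computed (duplicate coins and unreachable remainders cost nothing).
-- outside the precondition, e.g. on combination_sum_ways([0], 0): A returns 2, B returns 1; on combination_sum_ways([0, 2], 2): A returns 2, B does not finish within the time limit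
import Mathlib
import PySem

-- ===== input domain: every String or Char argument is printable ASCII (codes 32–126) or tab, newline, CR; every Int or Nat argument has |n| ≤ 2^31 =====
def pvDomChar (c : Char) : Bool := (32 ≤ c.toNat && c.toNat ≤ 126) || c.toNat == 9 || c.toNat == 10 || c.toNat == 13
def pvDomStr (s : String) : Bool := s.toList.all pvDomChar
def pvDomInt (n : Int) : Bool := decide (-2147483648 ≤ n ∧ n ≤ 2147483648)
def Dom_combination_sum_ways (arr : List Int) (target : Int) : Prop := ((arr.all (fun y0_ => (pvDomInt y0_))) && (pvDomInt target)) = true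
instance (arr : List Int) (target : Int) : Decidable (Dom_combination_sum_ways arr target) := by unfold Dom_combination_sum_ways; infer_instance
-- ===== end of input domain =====

-- B replaces A's bottom-up per-coin table sweeps by a top-down memoized skip/take search over
-- (index, remaining) states driven by an explicit stack; both sort arr in place (return-value equivalence proved).


-- ===== PORT A =====
-- dp indexing uses pyGetD/pySetD; under Pre_ every index touched is in range (exact there).
def combination_sum_ways (arr : List Int) (target : Int) : Int :=
  let arrS := PySem.List.sorted arr (fun x => x) false      -- arr.sort()
  let dp0 := PySem.List.pySetD (List.replicate (target + 1).toNat (0 : Int)) 0 1  -- dp_=[0]*(target+1); dp_[0]=1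
  let dpF := arrS.foldl (fun dp c =>
      (PySem.List.pyRange c (target + 1) 1).foldl (fun dp i =>
        PySem.List.pySetD dp i (PySem.List.pyGetD dp i 0 + PySem.List.pyGetD dp (i - c) 0)) dp) dp0
  PySem.List.pyGetD dpF target 0

-- ===== PORT B =====
-- The while loop over the explicit stack, one fuel unit per iteration (fuel is only a totality
-- guard: under Pre_ the machine empties its stack well within the fuel given below).
-- arr[i] is pyGetD: the branch is reached only with 0 ≤ i < len(arr), where it is exact.
def bRun (arrS : List Int) (n : Int) : Nat → List (Int × Int) → Std.HashMap (Int × Int) Int → Option (Std.HashMap (Int × Int) Int)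
  | _, [], memo => some memo
  | 0, _ :: _, _ => none
  | fuel+1, (i, rem) :: rest, memo =>
    if (memo[(i, rem)]?).isSome then bRun arrS n fuel rest memo          -- if (i, rem) in memo: pop
    else if rem = 0 then bRun arrS n fuel rest (memo.insert (i, rem) 1)     -- memo[i,rem]=1; pop
    else if rem < 0 ∨ i = n then bRun arrS n fuel rest (memo.insert (i, rem) 0)
    else
      let c := PySem.List.pyGetD arrS i 0                                   -- arr[i]
      match memo[(i, rem - c)]?, memo[(i + 1, rem)]? with
      | some take, some skip => bRun arrS n fuel rest (memo.insert (i, rem) (take + skip))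
      | some _, none => bRun arrS n fuel ((i + 1, rem) :: (i, rem) :: rest) memo
      | none, some _ => bRun arrS n fuel ((i, rem - c) :: (i, rem) :: rest) memo
      | none, none => bRun arrS n fuel ((i + 1, rem) :: (i, rem - c) :: (i, rem) :: rest) memo

def combination_sum_ways_alt (arr : List Int) (target : Int) : Int :=
  let arrS := PySem.List.sorted arr (fun x => x) false      -- arr.sort()
  let n : Int := arrS.length
  match bRun arrS n (4 ^ (target.toNat + arrS.length + 1)) [(0, target)] (∅ : Std.HashMap (Int × Int) Int) with
  | some memo => (memo[((0 : Int), target)]?).getD 0             -- return memo[0, target]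
  | none => 0

-- ===== PRECONDITION & SPEC =====
-- Pre_ restricts to the function's documented domain ("array of distinct positive integers", target sum):
-- A raises IndexError on negative target or any negative element; on a zero element A returns a doubled
-- count that is an artefact of dp_[i] += dp_[i - 0], while B's search loops there — those inputs are excluded.
def Pre_combination_sum_ways (arr : List Int) (target : Int) : Prop :=
  0 ≤ target ∧ ∀ x ∈ arr, 0 < x
instance (arr : List Int) (target : Int) : Decidable (Pre_combination_sum_ways arr target) := by
  unfold Pre_combination_sum_ways; infer_instance
def pvWitness_combination_sum_ways : List Int × Int := ([2, 3, 5], 8)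

def Spec_combination_sum_ways (arr : List Int) (target : Int) (out : Int) : Prop := out = combination_sum_ways_alt arr target
instance (arr : List Int) (target : Int) (out : Int) : Decidable (Spec_combination_sum_ways arr target out) := by unfold Spec_combination_sum_ways; infer_instance

-- ===== CLAIM (what is proved, stated in full; the proofs are below) =====
def Claim_equal_combination_sum_ways : Prop := ∀ (arr : List Int) (target : Int), Dom_combination_sum_ways arr target → Pre_combination_sum_ways arr target → Spec_combination_sum_ways arr target (combination_sum_ways arr target)

-- ===== LEMMAS AND PROOFS =====

-- Mathematical model of one coin pass of A: stepSum f c i = sum of f (i - j*c) over j*c <= i;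
-- mstep guards c <= 0 as identity so it is commutative for all Int arguments.
def stepSum (f : Nat → Int) (c : Nat) (i : Nat) : Int :=
  ∑ j ∈ Finset.range (i / c + 1), f (i - j * c)
def mstep (f : Nat → Int) (c : Int) : Nat → Int :=
  if c ≤ 0 then f else stepSum f c.toNat

theorem stepSum_rec (f : Nat → Int) (c : Nat) (hc : 0 < c) (i : Nat) :
    stepSum f c i = f i + (if c ≤ i then stepSum f c (i - c) else 0) := by
  unfold stepSum
  by_cases h : c ≤ i
  · rw [if_pos h, Nat.div_eq_sub_div hc h, Finset.sum_range_succ']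
    simp only [Nat.zero_mul, Nat.sub_zero]
    rw [add_comm]
    congr 1
    apply Finset.sum_congr rfl
    intro j hj
    simp only [Finset.mem_range] at hj
    have hj' : j ≤ (i - c) / c := by omega
    have h1 : j * c ≤ i - c := (Nat.le_div_iff_mul_le hc).1 hj'
    have h2 : (j + 1) * c = j * c + c := by ring
    congr 1
    omega
  · rw [if_neg h, Nat.div_eq_of_lt (by omega)]
    simp

theorem stepSum_eq_guarded (f : Nat → Int) (c : Nat) (hc : 0 < c) (i : Nat) :
    stepSum f c i = ∑ j ∈ Finset.range (i + 1), (if j * c ≤ i then f (i - j * c) else 0) := by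
  unfold stepSum
  have hsub : Finset.range (i / c + 1) ⊆ Finset.range (i + 1) := by
    intro x hx; simp only [Finset.mem_range] at hx ⊢
    have := Nat.div_le_self i c; omega
  have hzero : ∀ j ∈ Finset.range (i + 1), j ∉ Finset.range (i / c + 1) →
      (if j * c ≤ i then f (i - j * c) else 0) = 0 := by
    intro j hj hnj
    simp only [Finset.mem_range] at hj hnj
    have : ¬ j * c ≤ i := fun hle => hnj (by have := (Nat.le_div_iff_mul_le hc).2 hle; omega)
    rw [if_neg this]
  rw [← Finset.sum_subset hsub hzero]
  apply Finset.sum_congr rfl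
  intro j hj
  simp only [Finset.mem_range] at hj
  have hjd : j ≤ i / c := by omega
  rw [if_pos ((Nat.le_div_iff_mul_le hc).1 hjd)]

theorem stepSum_comm (f : Nat → Int) (c₁ c₂ : Nat) (h1 : 0 < c₁) (h2 : 0 < c₂) :
    stepSum (stepSum f c₂) c₁ = stepSum (stepSum f c₁) c₂ := by
  funext i
  rw [stepSum_eq_guarded _ _ h1, stepSum_eq_guarded _ _ h2]
  have key : ∀ (a b : Nat), 0 < a → 0 < b →
      (∑ j ∈ Finset.range (i + 1), if j * a ≤ i then stepSum f b (i - j * a) else 0)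
      = ∑ j ∈ Finset.range (i + 1), ∑ k ∈ Finset.range (i + 1),
          (if j * a + k * b ≤ i then f (i - (j * a + k * b)) else 0) := by
    intro a b ha hb
    apply Finset.sum_congr rfl
    intro j hj
    simp only [Finset.mem_range] at hj
    by_cases hja : j * a ≤ i
    · rw [if_pos hja, stepSum_eq_guarded _ _ hb]
      have hsub2 : Finset.range (i - j * a + 1) ⊆ Finset.range (i + 1) := by
        intro x hx; simp only [Finset.mem_range] at hx ⊢; omega
      have hzero2 : ∀ k ∈ Finset.range (i + 1), k ∉ Finset.range (i - j * a + 1) →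
          (if j * a + k * b ≤ i then f (i - (j * a + k * b)) else 0) = 0 := by
        intro k hk hnk
        simp only [Finset.mem_range] at hk hnk
        have hkk : k ≤ k * b := Nat.le_mul_of_pos_right k hb
        rw [if_neg (by omega)]
      rw [← Finset.sum_subset hsub2 hzero2]
      apply Finset.sum_congr rfl
      intro k hk
      simp only [Finset.mem_range] at hk
      by_cases hkb : k * b ≤ i - j * a
      · rw [if_pos hkb, if_pos (by omega)]
        congr 1
        omega
      · rw [if_neg hkb, if_neg (by omega)]
    · rw [if_neg hja]
      symm
      apply Finset.sum_eq_zero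
      intro k hk
      rw [if_neg (by omega)]
  rw [key c₁ c₂ h1 h2, key c₂ c₁ h2 h1, Finset.sum_comm]
  apply Finset.sum_congr rfl; intro j _; apply Finset.sum_congr rfl; intro k _
  rw [Nat.add_comm (k * c₁) (j * c₂)]

theorem stepSum_small (f : Nat → Int) (c : Nat) (hc : 0 < c) (i : Nat) (h : i < c) :
    stepSum f c i = f i := by
  rw [stepSum_rec f c hc i, if_neg (by omega)]; ring

theorem stepSum_at_zero (f : Nat → Int) (c : Nat) : stepSum f c 0 = f 0 := by
  unfold stepSum
  rw [Nat.zero_div, Finset.sum_range_one]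
  simp

theorem mstep_comm (f : Nat → Int) (c₁ c₂ : Int) :
    mstep (mstep f c₁) c₂ = mstep (mstep f c₂) c₁ := by
  unfold mstep
  by_cases h1 : c₁ ≤ 0 <;> by_cases h2 : c₂ ≤ 0 <;> simp [h1, h2]
  exact stepSum_comm f c₂.toNat c₁.toNat (by omega) (by omega)

theorem A_loop (T : Nat) (c : Int) (hc : 0 < c) (f : Nat → Int) (dp : List Int)
    (hlen : dp.length = T + 1)
    (hdp : ∀ i : Nat, i ≤ T → dp[i]? = some (f i)) :
    ∀ (k : Nat), c + k ≤ (T : Int) + 1 →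
      ((PySem.List.pyRange c (c + k) 1).foldl (fun dp i =>
          PySem.List.pySetD dp i (PySem.List.pyGetD dp i 0 + PySem.List.pyGetD dp (i - c) 0)) dp).length = T + 1 ∧
      ∀ i : Nat, i ≤ T →
        ((PySem.List.pyRange c (c + k) 1).foldl (fun dp i =>
          PySem.List.pySetD dp i (PySem.List.pyGetD dp i 0 + PySem.List.pyGetD dp (i - c) 0)) dp)[i]?
          = some (if (i : Int) < c + k then stepSum f c.toNat i else f i) := by
  intro k
  induction k with
  | zero =>
    intro hk
    rw [PySem.List.pyRange_one_eq_nil (by omega)]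
    refine ⟨hlen, fun i hi => ?_⟩
    rw [List.foldl_nil, hdp i hi]
    simp only [Nat.cast_zero, add_zero]
    by_cases h : (i : Int) < c
    · rw [if_pos h, stepSum_small f c.toNat (by omega) i (by omega)]
    · rw [if_neg h]
  | succ k ih =>
    intro hk
    have hk' : c + (k : Int) ≤ (T : Int) + 1 := by push_cast at hk; omega
    obtain ⟨ihlen, ihval⟩ := ih hk'
    have hsplit : PySem.List.pyRange c (c + (k + 1 : Nat)) 1
        = PySem.List.pyRange c (c + k) 1 ++ [c + k] := by
      have : (c + (k + 1 : Nat) : Int) = (c + k) + 1 := by push_cast; ring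
      rw [this, PySem.List.pyRange_one_succ_right (by omega)]
    rw [hsplit, List.foldl_append, List.foldl_cons, List.foldl_nil]
    set r := (PySem.List.pyRange c (c + k) 1).foldl (fun dp i =>
          PySem.List.pySetD dp i (PySem.List.pyGetD dp i 0 + PySem.List.pyGetD dp (i - c) 0)) dp with hr
    have hkT : (c : Int) + k ≤ (T : Int) := by push_cast at hk; omega
    have hm0 : (0 : Int) ≤ c + k := by omega
    have hmN : (((c + (k : Int)).toNat : Int)) = c + k := Int.toNat_of_nonneg hm0
    have hmNT : (c + (k : Int)).toNat ≤ T := by omega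
    have hrm : PySem.List.pyGetD r (c + k) 0 = f (c + (k : Int)).toNat := by
      rw [PySem.List.pyGetD_eq_getElem r 0 hm0 (by rw [ihlen]; push_cast; omega)]
      have h := ihval (c + (k : Int)).toNat hmNT
      rw [List.getElem?_eq_getElem (by omega)] at h
      have h2 := Option.some.inj h
      rw [h2, if_neg (by rw [hmN]; omega)]
    have hkle : (k : Int) ≤ (T : Int) := by omega
    have hrk : PySem.List.pyGetD r ((c + k) - c) 0 = stepSum f c.toNat k := by
      have he : (c + (k : Int)) - c = (k : Int) := by ring
      rw [he, PySem.List.pyGetD_eq_getElem r 0 (by omega) (by rw [ihlen]; push_cast; omega)]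
      simp only [Int.toNat_natCast]
      have h := ihval k (by omega)
      rw [List.getElem?_eq_getElem (by simp [ihlen]; omega)] at h
      have h2 := Option.some.inj h
      rw [h2, if_pos (by omega)]
    have hval : PySem.List.pyGetD r (c + k) 0 + PySem.List.pyGetD r ((c + k) - c) 0
        = stepSum f c.toNat (c + (k : Int)).toNat := by
      have hcN : 0 < c.toNat := by omega
      have hcle : c.toNat ≤ (c + (k : Int)).toNat := by omega
      have hsub : (c + (k : Int)).toNat - c.toNat = k := by omega
      rw [hrm, hrk]
      conv_rhs => rw [stepSum_rec f c.toNat hcN ((c + (k : Int)).toNat)]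
      rw [if_pos hcle, hsub]
    rw [hval, PySem.List.pySetD_of_nonneg r _ hm0]
    constructor
    · rw [List.length_set, ihlen]
    · intro i hi
      rw [List.getElem?_set]
      by_cases hieq : (c + (k : Int)).toNat = i
      · rw [if_pos hieq, if_pos (by rw [ihlen]; omega), if_pos (by push_cast; omega), ← hieq]
      · rw [if_neg hieq, ihval i hi]
        by_cases hlt : (i : Int) < c + k
        · rw [if_pos hlt, if_pos (by push_cast; omega)]
        · rw [if_neg hlt, if_neg (by push_cast; omega)]

theorem A_pass (target : Int) (ht : 0 ≤ target) (c : Int) (hc : 0 < c) (f : Nat → Int)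
    (dp : List Int) (hlen : dp.length = target.toNat + 1)
    (hdp : ∀ i : Nat, i ≤ target.toNat → dp[i]? = some (f i)) :
    ((PySem.List.pyRange c (target + 1) 1).foldl (fun dp i =>
        PySem.List.pySetD dp i (PySem.List.pyGetD dp i 0 + PySem.List.pyGetD dp (i - c) 0)) dp).length
      = target.toNat + 1 ∧
    ∀ i : Nat, i ≤ target.toNat →
      ((PySem.List.pyRange c (target + 1) 1).foldl (fun dp i =>
        PySem.List.pySetD dp i (PySem.List.pyGetD dp i 0 + PySem.List.pyGetD dp (i - c) 0)) dp)[i]?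
        = some (mstep f c i) := by
  have hms : mstep f c = stepSum f c.toNat := by unfold mstep; rw [if_neg (by omega)]
  by_cases hcT : c ≤ target + 1
  · have hck : c + (((target + 1 - c).toNat : Nat) : Int) = target + 1 := by
      rw [Int.toNat_of_nonneg (by omega)]; ring
    have h := A_loop target.toNat c hc f dp hlen hdp (target + 1 - c).toNat
      (by rw [hck, Int.toNat_of_nonneg ht])
    rw [hck] at h
    obtain ⟨h1, h2⟩ := h
    refine ⟨h1, fun i hi => ?_⟩
    rw [h2 i hi, if_pos (by omega), hms]
  · rw [PySem.List.pyRange_one_eq_nil (by omega)]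
    refine ⟨hlen, fun i hi => ?_⟩
    rw [List.foldl_nil, hdp i hi, hms, stepSum_small f c.toNat (by omega) i (by omega)]

def ways0 (i : Nat) : Int := if i = 0 then 1 else 0

theorem row0_get (target : Int) :
    ∀ i : Nat, i ≤ target.toNat → (1 :: List.replicate target.toNat (0 : Int))[i]? = some (ways0 i) := by
  intro i hi
  cases i with
  | zero => rfl
  | succ j =>
    unfold ways0
    rw [if_neg (by omega), List.getElem?_cons_succ, List.getElem?_replicate]
    rw [if_pos (by omega)]

theorem dp0_eq (target : Int) (ht : 0 ≤ target) :
    PySem.List.pySetD (List.replicate (target + 1).toNat (0 : Int)) 0 1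
      = 1 :: List.replicate target.toNat 0 := by
  rw [PySem.List.pySetD_of_nonneg _ _ (by omega),
      show (target + 1).toNat = target.toNat + 1 by omega, List.replicate_succ]
  rfl

theorem A_outer (target : Int) (ht : 0 ≤ target) :
    ∀ (L : List Int), (∀ x ∈ L, 0 < x) → ∀ (f : Nat → Int) (dp : List Int),
      dp.length = target.toNat + 1 → (∀ i : Nat, i ≤ target.toNat → dp[i]? = some (f i)) →
      (L.foldl (fun dp c =>
        (PySem.List.pyRange c (target + 1) 1).foldl (fun dp i =>
          PySem.List.pySetD dp i (PySem.List.pyGetD dp i 0 + PySem.List.pyGetD dp (i - c) 0)) dp) dp).length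
          = target.toNat + 1 ∧
      ∀ i : Nat, i ≤ target.toNat →
        (L.foldl (fun dp c =>
          (PySem.List.pyRange c (target + 1) 1).foldl (fun dp i =>
            PySem.List.pySetD dp i (PySem.List.pyGetD dp i 0 + PySem.List.pyGetD dp (i - c) 0)) dp) dp)[i]?
          = some (L.foldl mstep f i) := by
  intro L
  induction L with
  | nil => intro _ f dp h1 h2; exact ⟨h1, h2⟩
  | cons c L ih =>
    intro hpos f dp h1 h2
    have hc : 0 < c := hpos c (List.mem_cons_self ..)
    obtain ⟨g1, g2⟩ := A_pass target ht c hc f dp h1 h2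
    simp only [List.foldl_cons]
    exact ih (fun x hx => hpos x (List.mem_cons_of_mem _ hx)) (mstep f c) _ g1 g2

-- Mathematical model of B: cnt L r = number of multisets from L summing to r.
def cnt : List Int → Int → Int
  | [], r => if r = 0 then 1 else 0
  | c :: L, r => if r < 0 then 0 else stepSum (fun j => cnt L j) c.toNat r.toNat

theorem cnt_zero (L : List Int) : cnt L 0 = 1 := by
  induction L with
  | nil => rfl
  | cons c L ih =>
    show (if (0 : Int) < 0 then 0 else stepSum (fun j => cnt L j) c.toNat (0 : Int).toNat) = 1
    rw [if_neg (by omega)]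
    show stepSum (fun j => cnt L j) c.toNat 0 = 1
    rw [stepSum_at_zero]
    exact ih

theorem cnt_neg (L : List Int) (r : Int) (hr : r < 0) : cnt L r = 0 := by
  cases L with
  | nil => show (if r = 0 then (1 : Int) else 0) = 0; rw [if_neg (by omega)]
  | cons c L => show (if r < 0 then (0 : Int) else _) = 0; rw [if_pos hr]

theorem cnt_split (c : Int) (L : List Int) (r : Int) (hc : 0 < c) (hr : 0 < r) :
    cnt (c :: L) r = cnt (c :: L) (r - c) + cnt L r := by
  have hcN : 0 < c.toNat := by omega
  have h1 : cnt (c :: L) r = stepSum (fun j => cnt L j) c.toNat r.toNat := by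
    show (if r < 0 then (0:Int) else _) = _; rw [if_neg (by omega)]
  rw [h1, stepSum_rec _ c.toNat hcN r.toNat]
  have hf : cnt L ((r.toNat : Int)) = cnt L r := by rw [Int.toNat_of_nonneg (by omega)]
  by_cases hcr : c ≤ r
  · rw [if_pos (by omega)]
    have h2 : cnt (c :: L) (r - c) = stepSum (fun j => cnt L j) c.toNat (r - c).toNat := by
      show (if r - c < 0 then (0:Int) else _) = _; rw [if_neg (by omega)]
    rw [h2, show (r - c).toNat = r.toNat - c.toNat by omega, hf]
    ring
  · rw [if_neg (by omega)]
    have h2 : cnt (c :: L) (r - c) = 0 := cnt_neg _ _ (by omega)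
    rw [h2, hf]
    ring

theorem cnt_eq_foldr (L : List Int) (hpos : ∀ x ∈ L, 0 < x) (j : Nat) :
    cnt L (j : Int) = (List.foldr (fun c f => mstep f c) ways0 L) j := by
  induction L generalizing j with
  | nil =>
    show (if (j : Int) = 0 then (1:Int) else 0) = ways0 j
    unfold ways0
    by_cases h : j = 0
    · rw [if_pos (by omega), if_pos h]
    · rw [if_neg (by omega), if_neg h]
  | cons c L ih =>
    have hc : 0 < c := hpos c (List.mem_cons_self ..)
    have h1 : cnt (c :: L) (j : Int) = stepSum (fun k => cnt L k) c.toNat (j : Int).toNat := by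
      show (if (j : Int) < 0 then (0:Int) else _) = _; rw [if_neg (by omega)]
    rw [h1]
    simp only [List.foldr_cons]
    have h2 : mstep (List.foldr (fun c f => mstep f c) ways0 L) c
        = stepSum (List.foldr (fun c f => mstep f c) ways0 L) c.toNat := by
      unfold mstep; rw [if_neg (by omega)]
    rw [h2, show (j : Int).toNat = j from Int.toNat_natCast j]
    unfold stepSum
    apply Finset.sum_congr rfl
    intro k _
    exact ih (fun x hx => hpos x (List.mem_cons_of_mem _ hx)) _

-- B's machine invariant: every memo entry is a correct reachable state value.
def stVal (L : List Int) (i r : Int) : Int := cnt (L.drop i.toNat) r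

def MemOK (L : List Int) (m : Std.HashMap (Int × Int) Int) : Prop :=
  ∀ i r v, m[(i, r)]? = some v → 0 ≤ i ∧ i ≤ (L.length : Int) ∧ v = stVal L i r

theorem memOK_insert (L : List Int) (m : Std.HashMap (Int × Int) Int) (h : MemOK L m)
    (i r : Int) (h0 : 0 ≤ i) (h1 : i ≤ (L.length : Int)) :
    MemOK L (m.insert (i, r) (stVal L i r)) := by
  intro i' r' v' hget
  rw [Std.HashMap.getElem?_insert] at hget
  simp only [beq_iff_eq] at hget
  split at hget
  next he =>
    obtain ⟨he1, he2⟩ := Prod.mk.injEq .. ▸ he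
    subst he1; subst he2
    exact ⟨h0, h1, (Option.some.inj hget).symm⟩
  next => exact h i' r' v' hget

-- Single-step evaluation lemmas for B's machine, and the resolution of one stack state.
theorem bRun_nil (L : List Int) (N : Int) (fuel : Nat) (memo : Std.HashMap (Int × Int) Int) :
    bRun L N fuel [] memo = some memo := by
  cases fuel <;> rfl

-- step lemmas
theorem bRun_hit (L : List Int) (N : Int) (fuel : Nat) (i rem : Int) (rest : List (Int × Int))
    (memo : Std.HashMap (Int × Int) Int) (h : (memo[(i, rem)]?).isSome = true) :
    bRun L N (fuel + 1) ((i, rem) :: rest) memo = bRun L N fuel rest memo := by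
  simp [bRun, h]

theorem bRun_base1 (L : List Int) (N : Int) (fuel : Nat) (i : Int) (rest : List (Int × Int))
    (memo : Std.HashMap (Int × Int) Int) (h : memo[(i, (0 : Int))]? = none) :
    bRun L N (fuel + 1) ((i, (0:Int)) :: rest) memo = bRun L N fuel rest (memo.insert (i, 0) 1) := by
  simp [bRun, h]

theorem bRun_base0 (L : List Int) (N : Int) (fuel : Nat) (i rem : Int) (rest : List (Int × Int))
    (memo : Std.HashMap (Int × Int) Int) (h : memo[(i, rem)]? = none)
    (h2 : rem ≠ 0) (h3 : rem < 0 ∨ i = N) :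
    bRun L N (fuel + 1) ((i, rem) :: rest) memo = bRun L N fuel rest (memo.insert (i, rem) 0) := by
  simp [bRun, h, h2, h3]

theorem bRun_combine (L : List Int) (N : Int) (fuel : Nat) (i rem ta sb : Int) (rest : List (Int × Int))
    (memo : Std.HashMap (Int × Int) Int) (h : memo[(i, rem)]? = none)
    (h2 : rem ≠ 0) (h3 : ¬(rem < 0 ∨ i = N))
    (ha : memo[(i, rem - PySem.List.pyGetD L i 0)]? = some ta)
    (hb : memo[(i + 1, rem)]? = some sb) :
    bRun L N (fuel + 1) ((i, rem) :: rest) memo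
      = bRun L N fuel rest (memo.insert (i, rem) (ta + sb)) := by
  simp [bRun, h, h2, h3, ha, hb]

theorem bRun_pushB (L : List Int) (N : Int) (fuel : Nat) (i rem ta : Int) (rest : List (Int × Int))
    (memo : Std.HashMap (Int × Int) Int) (h : memo[(i, rem)]? = none)
    (h2 : rem ≠ 0) (h3 : ¬(rem < 0 ∨ i = N))
    (ha : memo[(i, rem - PySem.List.pyGetD L i 0)]? = some ta)
    (hb : memo[(i + 1, rem)]? = none) :
    bRun L N (fuel + 1) ((i, rem) :: rest) memo
      = bRun L N fuel ((i + 1, rem) :: (i, rem) :: rest) memo := by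
  simp [bRun, h, h2, h3, ha, hb]

theorem bRun_pushA (L : List Int) (N : Int) (fuel : Nat) (i rem sb : Int) (rest : List (Int × Int))
    (memo : Std.HashMap (Int × Int) Int) (h : memo[(i, rem)]? = none)
    (h2 : rem ≠ 0) (h3 : ¬(rem < 0 ∨ i = N))
    (ha : memo[(i, rem - PySem.List.pyGetD L i 0)]? = none)
    (hb : memo[(i + 1, rem)]? = some sb) :
    bRun L N (fuel + 1) ((i, rem) :: rest) memo
      = bRun L N fuel ((i, rem - PySem.List.pyGetD L i 0) :: (i, rem) :: rest) memo := by
  simp [bRun, h, h2, h3, ha, hb]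

theorem bRun_pushAB (L : List Int) (N : Int) (fuel : Nat) (i rem : Int) (rest : List (Int × Int))
    (memo : Std.HashMap (Int × Int) Int) (h : memo[(i, rem)]? = none)
    (h2 : rem ≠ 0) (h3 : ¬(rem < 0 ∨ i = N))
    (ha : memo[(i, rem - PySem.List.pyGetD L i 0)]? = none)
    (hb : memo[(i + 1, rem)]? = none) :
    bRun L N (fuel + 1) ((i, rem) :: rest) memo
      = bRun L N fuel ((i + 1, rem) :: (i, rem - PySem.List.pyGetD L i 0) :: (i, rem) :: rest) memo := by
  simp [bRun, h, h2, h3, ha, hb]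

theorem resolve (L : List Int) (hpos : ∀ x ∈ L, 0 < x) :
    ∀ (μ : Nat), ∀ (i r : Int) (m : Std.HashMap (Int × Int) Int),
      0 ≤ i → i ≤ (L.length : Int) → MemOK L m →
      r.toNat * (L.length + 1) + (L.length - i.toNat) ≤ μ →
      ∃ (f : Nat) (m' : Std.HashMap (Int × Int) Int),
        f ≤ 4 ^ (r.toNat + (L.length - i.toNat) + 1) ∧ MemOK L m' ∧
        (∀ (k : Int × Int) (v : Int), m[k]? = some v → m'[k]? = some v) ∧
        m'[(i, r)]? = some (stVal L i r) ∧
        ∀ (rest : List (Int × Int)) (g : Nat),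
          bRun L (L.length : Int) (f + g) ((i, r) :: rest) m = bRun L (L.length : Int) g rest m' := by
  intro μ
  induction μ using Nat.strong_induction_on with
  | _ μ ih =>
    intro i r m h0 h1 hm hμ
    by_cases hmem : (m[(i, r)]?).isSome
    · obtain ⟨v, hv⟩ := Option.isSome_iff_exists.mp hmem
      obtain ⟨-, -, hveq⟩ := hm i r v hv
      refine ⟨1, m, Nat.one_le_pow _ _ (by omega), hm, fun k v h => h, by rw [hv, hveq], ?_⟩
      intro rest g
      rw [Nat.add_comm 1 g]
      exact bRun_hit L _ g i r rest m hmem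
    · have hmn : m[(i, r)]? = none := Option.not_isSome_iff_eq_none.mp hmem
      by_cases hr0 : r = 0
      · subst hr0
        have hsv : stVal L i 0 = 1 := cnt_zero _
        refine ⟨1, m.insert (i, (0 : Int)) 1, Nat.one_le_pow _ _ (by omega), ?_, ?_, ?_, ?_⟩
        · have h' := memOK_insert L m hm i 0 h0 h1
          rwa [hsv] at h'
        · intro k v h
          rw [Std.HashMap.getElem?_insert]
          simp only [beq_iff_eq]
          split
          next he => rw [← he] at h; rw [h] at hmn; cases hmn
          next => exact h
        · rw [Std.HashMap.getElem?_insert_self, hsv]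
        · intro rest g
          rw [Nat.add_comm 1 g]
          exact bRun_base1 L _ g i rest m hmn
      · by_cases hbase : r < 0 ∨ i = (L.length : Int)
        · have hsv : stVal L i r = 0 := by
            rcases hbase with h | h
            · exact cnt_neg _ _ h
            · unfold stVal
              have hit : i.toNat = L.length := by omega
              rw [hit, List.drop_length]
              show (if r = 0 then (1:Int) else 0) = 0
              rw [if_neg hr0]
          refine ⟨1, m.insert (i, r) 0, Nat.one_le_pow _ _ (by omega), ?_, ?_, ?_, ?_⟩
          · have h' := memOK_insert L m hm i r h0 h1
            rwa [hsv] at h'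
          · intro k v h
            rw [Std.HashMap.getElem?_insert]
            simp only [beq_iff_eq]
            split
            next he => rw [← he] at h; rw [h] at hmn; cases hmn
            next => exact h
          · rw [Std.HashMap.getElem?_insert_self, hsv]
          · intro rest g
            rw [Nat.add_comm 1 g]
            exact bRun_base0 L _ g i r rest m hmn hr0 hbase
        · -- main case: 0 ≤ i < N, r > 0, state not memoized
          push_neg at hbase
          obtain ⟨hrge, hiN⟩ := hbase
          have hr : 0 < r := by omega
          have hilen : i.toNat < L.length := by omega
          set c := PySem.List.pyGetD L i 0 with hcdef
          have hcget : c = L[i.toNat] := by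
            rw [hcdef, PySem.List.pyGetD_eq_getElem L 0 h0 (by omega)]
          have hc : 0 < c := by rw [hcget]; exact hpos _ (List.getElem_mem _)
          have hdrop : L.drop i.toNat = c :: L.drop (i.toNat + 1) := by
            rw [List.drop_eq_getElem_cons hilen, hcget]
          have hi1 : (i + 1).toNat = i.toNat + 1 := by omega
          have hrec : stVal L i r = stVal L i (r - c) + stVal L (i + 1) r := by
            unfold stVal
            rw [hdrop, hi1, cnt_split c _ r hc hr]
          have hrt1 : 1 ≤ r.toNat := by omega
          have hsubmul : (r.toNat - 1) * (L.length + 1)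
              = r.toNat * (L.length + 1) - (L.length + 1) := by
            rw [Nat.sub_mul, one_mul]
          have hmulle : r.toNat * (L.length + 1) ≥ L.length + 1 := by
            calc r.toNat * (L.length + 1) ≥ 1 * (L.length + 1) :=
                  Nat.mul_le_mul_right _ hrt1
              _ = L.length + 1 := one_mul _
          have hμ1 : 1 ≤ μ := by omega
          have hmeasB : r.toNat * (L.length + 1) + (L.length - (i + 1).toNat) ≤ μ - 1 := by
            rw [hi1]; omega
          have hmeasA : (r - c).toNat * (L.length + 1) + (L.length - i.toNat) ≤ μ - 1 := by
            have hle : (r - c).toNat ≤ r.toNat - 1 := by omega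
            have h' := Nat.mul_le_mul_right (L.length + 1) hle
            rw [hsubmul] at h'
            omega
          -- convergence helper: the children of (i, r) are memoized in m2; one more step resolves (i, r)
          have finish : ∀ (fpre : Nat) (m2 : Std.HashMap (Int × Int) Int),
              MemOK L m2 → (∀ (k : Int × Int) (v : Int), m[k]? = some v → m2[k]? = some v) →
              (m2[(i, r - c)]?).isSome → (m2[(i + 1, r)]?).isSome →
              (∀ rest g, bRun L (L.length : Int) (fpre + g) ((i, r) :: rest) m
                  = bRun L (L.length : Int) g ((i, r) :: rest) m2) →
              ∃ m', MemOK L m' ∧ (∀ (k : Int × Int) (v : Int), m[k]? = some v → m'[k]? = some v) ∧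
                m'[(i, r)]? = some (stVal L i r) ∧
                ∀ rest g, bRun L (L.length : Int) ((fpre + 1) + g) ((i, r) :: rest) m
                    = bRun L (L.length : Int) g rest m' := by
            intro fpre m2 hm2 hsub2 hA hB hpre
            by_cases hfin : (m2[(i, r)]?).isSome
            · obtain ⟨v, hv⟩ := Option.isSome_iff_exists.mp hfin
              obtain ⟨-, -, hveq⟩ := hm2 i r v hv
              refine ⟨m2, hm2, hsub2, by rw [hv, hveq], ?_⟩
              intro rest g
              have harr : fpre + 1 + g = fpre + (1 + g) := by omega
              rw [harr, hpre rest (1 + g), Nat.add_comm 1 g]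
              exact bRun_hit L _ g i r rest m2 hfin
            · have hfn : m2[(i, r)]? = none := Option.not_isSome_iff_eq_none.mp hfin
              obtain ⟨va, hva⟩ := Option.isSome_iff_exists.mp hA
              obtain ⟨vb, hvb⟩ := Option.isSome_iff_exists.mp hB
              obtain ⟨-, -, hvaeq⟩ := hm2 i (r - c) va hva
              obtain ⟨-, -, hvbeq⟩ := hm2 (i + 1) r vb hvb
              have hsum : va + vb = stVal L i r := by rw [hvaeq, hvbeq, hrec]
              refine ⟨m2.insert (i, r) (va + vb), ?_, ?_, ?_, ?_⟩
              · have h' := memOK_insert L m2 hm2 i r h0 h1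
                rwa [← hsum] at h'
              · intro k v h
                rw [Std.HashMap.getElem?_insert]
                simp only [beq_iff_eq]
                split
                next he => have h2 := hsub2 k v h; rw [← he] at h2; rw [h2] at hfn; cases hfn
                next => exact hsub2 k v h
              · rw [Std.HashMap.getElem?_insert_self, hsum]
              · intro rest g
                have harr : fpre + 1 + g = fpre + (1 + g) := by omega
                rw [harr, hpre rest (1 + g), Nat.add_comm 1 g]
                exact bRun_combine L _ g i r va vb rest m2 hfn hr0
                  (by push_neg; exact ⟨hrge, hiN⟩) (hcdef ▸ hva) hvb
          have hpow4 : 0 < (4:Nat) ^ (r.toNat + (L.length - i.toNat)) := Nat.pow_pos (by omega)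
          have hpowsucc : (4:Nat) ^ (r.toNat + (L.length - i.toNat) + 1)
              = 4 * 4 ^ (r.toNat + (L.length - i.toNat)) := by rw [pow_succ]; ring
          have hexpB : r.toNat + (L.length - (i + 1).toNat) + 1 = r.toNat + (L.length - i.toNat) := by
            rw [hi1]; omega
          have hexpA : (r - c).toNat + (L.length - i.toNat) + 1 ≤ r.toNat + (L.length - i.toNat) := by
            omega
          cases hA0 : m[(i, r - c)]? with
          | some va =>
            cases hB0 : m[(i + 1, r)]? with
            | some vb =>
              obtain ⟨m', hm', hsub', hget', hrun'⟩ := finish 0 m hm (fun k v h => h)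
                (by rw [hA0]; rfl) (by rw [hB0]; rfl) (fun rest g => by rw [Nat.zero_add])
              exact ⟨1, m', Nat.one_le_pow _ _ (by omega), hm', hsub', hget', hrun'⟩
            | none =>
              obtain ⟨fb, m1, hfb, hm1, hsub1, hget1, hrun1⟩ :=
                ih (μ - 1) (by omega) (i + 1) r m (by omega) (by omega) hm hmeasB
              have hpre1 : ∀ rest g, bRun L (L.length : Int) ((1 + fb) + g) ((i, r) :: rest) m
                  = bRun L (L.length : Int) g ((i, r) :: rest) m1 := by
                intro rest g
                have harr : 1 + fb + g = (fb + g) + 1 := by omega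
                rw [harr, bRun_pushB L _ (fb + g) i r va rest m hmn hr0
                  (by push_neg; exact ⟨hrge, hiN⟩) (hcdef ▸ hA0) hB0]
                exact hrun1 ((i, r) :: rest) g
              obtain ⟨m', hm', hsub', hget', hrun'⟩ := finish (1 + fb) m1 hm1 hsub1
                (by rw [hsub1 _ _ hA0]; rfl) (by rw [hget1]; rfl) hpre1
              refine ⟨1 + fb + 1, m', ?_, hm', hsub', hget', hrun'⟩
              rw [hexpB] at hfb
              omega
          | none =>
            cases hB0 : m[(i + 1, r)]? with
            | some vb =>
              obtain ⟨fa, m1, hfa, hm1, hsub1, hget1, hrun1⟩ :=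
                ih (μ - 1) (by omega) i (r - c) m h0 h1 hm hmeasA
              have hpre1 : ∀ rest g, bRun L (L.length : Int) ((1 + fa) + g) ((i, r) :: rest) m
                  = bRun L (L.length : Int) g ((i, r) :: rest) m1 := by
                intro rest g
                have harr : 1 + fa + g = (fa + g) + 1 := by omega
                rw [harr, bRun_pushA L _ (fa + g) i r vb rest m hmn hr0
                  (by push_neg; exact ⟨hrge, hiN⟩) (hcdef ▸ hA0) hB0]
                exact hrun1 ((i, r) :: rest) g
              obtain ⟨m', hm', hsub', hget', hrun'⟩ := finish (1 + fa) m1 hm1 hsub1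
                (by rw [hget1]; rfl) (by rw [hsub1 _ _ hB0]; rfl) hpre1
              refine ⟨1 + fa + 1, m', ?_, hm', hsub', hget', hrun'⟩
              have hfa' : fa ≤ 4 ^ (r.toNat + (L.length - i.toNat)) :=
                le_trans hfa (Nat.pow_le_pow_right (by omega) hexpA)
              omega
            | none =>
              obtain ⟨fb, m1, hfb, hm1, hsub1, hget1, hrun1⟩ :=
                ih (μ - 1) (by omega) (i + 1) r m (by omega) (by omega) hm hmeasB
              obtain ⟨fa, m2, hfa, hm2, hsub2, hget2, hrun2⟩ :=
                ih (μ - 1) (by omega) i (r - c) m1 h0 h1 hm1 hmeasA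
              have hpre1 : ∀ rest g, bRun L (L.length : Int) ((1 + fb + fa) + g) ((i, r) :: rest) m
                  = bRun L (L.length : Int) g ((i, r) :: rest) m2 := by
                intro rest g
                have harr : 1 + fb + fa + g = (fb + (fa + g)) + 1 := by omega
                rw [harr, bRun_pushAB L _ (fb + (fa + g)) i r rest m hmn hr0
                  (by push_neg; exact ⟨hrge, hiN⟩) (hcdef ▸ hA0) hB0]
                rw [hrun1 ((i, r - c) :: (i, r) :: rest) (fa + g)]
                exact hrun2 ((i, r) :: rest) g
              obtain ⟨m', hm', hsub', hget', hrun'⟩ := finish (1 + fb + fa) m2 hm2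
                (fun k v h => hsub2 k v (hsub1 k v h))
                (by rw [hget2]; rfl) (by rw [hsub2 _ _ hget1]; rfl) hpre1
              refine ⟨1 + fb + fa + 1, m', ?_, hm', hsub', hget', hrun'⟩
              rw [hexpB] at hfb
              have hfa' : fa ≤ 4 ^ (r.toNat + (L.length - i.toNat)) :=
                le_trans hfa (Nat.pow_le_pow_right (by omega) hexpA)
              omega

theorem combination_sum_ways_spec : Claim_equal_combination_sum_ways := by
  intro arr target _ hpre
  obtain ⟨ht, hpos⟩ := hpre
  unfold Spec_combination_sum_ways combination_sum_ways combination_sum_ways_alt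
  simp only []
  set arrS := PySem.List.sorted arr (fun x => x) false with harrS
  have hposS : ∀ x ∈ arrS, 0 < x := fun x hx =>
    hpos x ((PySem.List.mem_sorted arr (fun x => x) false x).1 hx)
  have hempty : MemOK arrS (∅ : Std.HashMap (Int × Int) Int) := by
    intro i r v h
    rw [Std.HashMap.getElem?_empty] at h
    cases h
  obtain ⟨f, m', hf, hm', hsub, hget, hrun⟩ :=
    resolve arrS hposS (target.toNat * (arrS.length + 1) + arrS.length) 0 target
      (∅ : Std.HashMap (Int × Int) Int) (by omega) (by omega) hempty (by simp)
  have hbrun : bRun arrS (arrS.length : Int) (4 ^ (target.toNat + arrS.length + 1))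
      [(0, target)] (∅ : Std.HashMap (Int × Int) Int) = some m' := by
    have hfle : f ≤ 4 ^ (target.toNat + arrS.length + 1) := by simpa using hf
    have hsplit : 4 ^ (target.toNat + arrS.length + 1)
        = f + (4 ^ (target.toNat + arrS.length + 1) - f) := by omega
    rw [hsplit, hrun [] _, bRun_nil]
  rw [hbrun]
  show PySem.List.pyGetD _ target 0 = (m'[((0 : Int), target)]?).getD 0
  rw [hget, Option.getD_some, dp0_eq target ht]
  obtain ⟨ha1, ha2⟩ := A_outer target ht arrS hposS ways0 _ (by simp) (row0_get target)
  have hAv := ha2 target.toNat (by omega)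
  rw [PySem.List.pyGetD_eq_getElem _ 0 ht (by rw [ha1]; omega)]
  rw [List.getElem?_eq_getElem (by omega)] at hAv
  rw [Option.some.inj hAv]
  have h1 : List.foldl mstep ways0 arrS = List.foldl mstep ways0 arrS.reverse :=
    @List.Perm.foldl_eq _ _ mstep _ _ ⟨fun b a₁ a₂ => mstep_comm b a₁ a₂⟩
      (List.reverse_perm arrS).symm ways0
  have h2 : List.foldl mstep ways0 arrS.reverse = List.foldr (fun c f => mstep f c) ways0 arrS :=
    List.foldl_reverse
  have h3 := cnt_eq_foldr arrS hposS target.toNat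
  show List.foldl mstep ways0 arrS target.toNat = stVal arrS 0 target
  unfold stVal
  rw [h1, h2, ← h3, Int.toNat_of_nonneg ht]
  rfl
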